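-- pv_equiv track=rewrite | github.com/samuelarogbonlo/paraclete | backend/app/agents/specialists/designer.py | determine_design_focus
-- ===== SOURCE A (Python) =====
-- def determine_design_focus(task: str) -> str:
--     """Determine the primary focus of the design task."""
--     task_lower = task.lower()
--
--     if any(word in task_lower for word in ["architecture", "system design", "microservice"]):
--         return "architecture"
--     elif any(word in task_lower for word in ["database", "schema", "model", "entity"]):
--         return "database"
--     elif any(word in task_lower for word in ["api", "endpoint", "rest", "graphql"]):
--         return "api"
--     elif any(word in task_lower for word in ["ui", "ux", "interface", "component", "screen"]):
--         return "ui_ux"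
--     elif any(word in task_lower for word in ["flow", "process", "workflow", "sequence"]):
--         return "workflow"
--     else:
--         return "system"  # General system design
-- ===== SOURCE B (Python) =====
-- _KEYWORDS = [
--     ("architecture", 0), ("system design", 0), ("microservice", 0),
--     ("database", 1), ("schema", 1), ("model", 1), ("entity", 1),
--     ("api", 2), ("endpoint", 2), ("rest", 2), ("graphql", 2),
--     ("ui", 3), ("ux", 3), ("interface", 3), ("component", 3), ("screen", 3),
--     ("flow", 4), ("process", 4), ("workflow", 4), ("sequence", 4),
-- ]
-- _LABELS = ["architecture", "database", "api", "ui_ux", "workflow", "system"]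
--
--
-- def determine_design_focus(task: str) -> str:
--     """Determine the primary focus of the design task.
--
--     Single left-to-right scan over the text: at each position, check which
--     keywords start there (a naive multi-pattern matcher) and keep the best
--     (lowest) priority seen; the label of the best priority wins."""
--     t = task.lower()
--     best = 5  # priority of the fallback label "system"
--     for i in range(len(t)):
--         for kw, prio in _KEYWORDS:
--             if prio < best and t.startswith(kw, i):
--                 best = prio
--     return _LABELS[best]
-- ===== Notes on version B (the rewrite author's own statement) =====
-- stated objective: alternative
-- what changed: Replaces the priority chain of substring-membership tests with a single left-to-right scan of the text: at each position a flat keyword table is matched (naive multi-pattern matcher) and the minimum priority seen selects the label.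
import Mathlib
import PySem

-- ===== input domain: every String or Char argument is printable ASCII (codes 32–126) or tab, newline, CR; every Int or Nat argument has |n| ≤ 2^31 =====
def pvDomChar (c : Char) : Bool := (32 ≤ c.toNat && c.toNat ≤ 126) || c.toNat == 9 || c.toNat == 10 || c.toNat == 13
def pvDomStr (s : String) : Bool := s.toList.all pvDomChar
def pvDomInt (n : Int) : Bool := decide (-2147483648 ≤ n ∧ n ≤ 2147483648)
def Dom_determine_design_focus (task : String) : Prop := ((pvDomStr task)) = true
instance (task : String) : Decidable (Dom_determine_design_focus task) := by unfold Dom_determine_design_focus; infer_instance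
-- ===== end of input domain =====

-- B replaces the priority chain of substring tests with a single left-to-right scan of the
-- text that matches a flat keyword table at each position and keeps the minimum priority
-- (objective: alternative algorithm, same cost).

-- ===== PORT A =====
def determine_design_focus (task : String) : String :=
  let task_lower := PySem.Str.lower task
  if ["architecture", "system design", "microservice"].any (fun w => PySem.Str.isIn w task_lower) then
    "architecture"
  else if ["database", "schema", "model", "entity"].any (fun w => PySem.Str.isIn w task_lower) then
    "database"
  else if ["api", "endpoint", "rest", "graphql"].any (fun w => PySem.Str.isIn w task_lower) then
    "api"
  else if ["ui", "ux", "interface", "component", "screen"].any (fun w => PySem.Str.isIn w task_lower) then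
    "ui_ux"
  else if ["flow", "process", "workflow", "sequence"].any (fun w => PySem.Str.isIn w task_lower) then
    "workflow"
  else
    "system"

-- ===== PORT B =====
def pvKeywords : List (String × Nat) :=
  [("architecture", 0), ("system design", 0), ("microservice", 0),
   ("database", 1), ("schema", 1), ("model", 1), ("entity", 1),
   ("api", 2), ("endpoint", 2), ("rest", 2), ("graphql", 2),
   ("ui", 3), ("ux", 3), ("interface", 3), ("component", 3), ("screen", 3),
   ("flow", 4), ("process", 4), ("workflow", 4), ("sequence", 4)]

def pvLabels : List String := ["architecture", "database", "api", "ui_ux", "workflow", "system"]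

-- t.startswith(kw, i) with 0 ≤ i is exactly: kw.toList is a prefix of (drop i); indexing
-- _LABELS[best] never raises since best ≤ 5 < 6, so getD is exact.
def determine_design_focus_alt (task : String) : String :=
  let t := (PySem.Str.lower task).toList
  let best := (List.range t.length).foldl (fun best i =>
      pvKeywords.foldl (fun b kv =>
        if kv.2 < b ∧ kv.1.toList.isPrefixOf (t.drop i) then kv.2 else b) best) 5
  pvLabels.getD best ""

-- ===== PRECONDITION & SPEC =====
def Spec_determine_design_focus (task : String) (out : String) : Prop := out = determine_design_focus_alt task
instance (task : String) (out : String) : Decidable (Spec_determine_design_focus task out) := by unfold Spec_determine_design_focus; infer_instance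

-- ===== CLAIM (what is proved, stated in full; the proofs are below) =====
def Claim_equal_determine_design_focus : Prop := ∀ (task : String), Dom_determine_design_focus task → Spec_determine_design_focus task (determine_design_focus task)

-- ===== LEMMAS AND PROOFS =====

-- all priorities matched anywhere in t, in scan order
def pvS (t : List Char) : List Nat :=
  (List.range t.length).flatMap (fun i =>
    pvKeywords.filterMap (fun kv => if kv.1.toList.isPrefixOf (t.drop i) then some kv.2 else none))

-- "some keyword of priority p occurs in t"
def pvG (p : Nat) (t : List Char) : Prop :=
  ∃ kv ∈ pvKeywords, kv.2 = p ∧ kv.1.toList <:+: t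

lemma pv_inner_eq (ks : List (String × Nat)) (c : String → Bool) (b : Nat) :
    ks.foldl (fun b kv => if kv.2 < b ∧ c kv.1 then kv.2 else b) b
      = (ks.filterMap (fun kv => if c kv.1 then some kv.2 else none)).foldl min b := by
  induction ks generalizing b with
  | nil => rfl
  | cons kv rest ih =>
    simp only [List.foldl_cons, List.filterMap_cons]
    by_cases h : c kv.1 = true
    · rw [if_pos h, List.foldl_cons]
      have e : (if kv.2 < b ∧ c kv.1 = true then kv.2 else b) = min b kv.2 := by
        by_cases h' : kv.2 < b
        · rw [if_pos ⟨h', h⟩]; omega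
        · rw [if_neg (fun hc => h' hc.1)]; omega
      rw [e]; exact ih _
    · rw [if_neg h]
      have e : (if kv.2 < b ∧ c kv.1 = true then kv.2 else b) = b := by
        rw [if_neg (fun hc => h hc.2)]
      rw [e]; exact ih b

lemma pv_outer_eq (L : List Nat) (t : List Char) (b : Nat) :
    L.foldl (fun b i => pvKeywords.foldl (fun b kv =>
        if kv.2 < b ∧ kv.1.toList.isPrefixOf (t.drop i) then kv.2 else b) b) b
      = (L.flatMap (fun i =>
          pvKeywords.filterMap (fun kv =>
            if kv.1.toList.isPrefixOf (t.drop i) then some kv.2 else none))).foldl min b := by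
  induction L generalizing b with
  | nil => rw [List.foldl_nil, List.flatMap_nil, List.foldl_nil]
  | cons i rest ih =>
    rw [List.foldl_cons, List.flatMap_cons, List.foldl_append,
      pv_inner_eq pvKeywords (fun w => w.toList.isPrefixOf (t.drop i)) b, ih]

lemma pv_foldl_min_mem (S : List Nat) (b : Nat) : S.foldl min b ∈ b :: S := by
  induction S generalizing b with
  | nil => simp [List.foldl]
  | cons a rest ih =>
    rw [List.foldl_cons]
    rcases List.mem_cons.mp (ih (min b a)) with h | h
    · rcases Nat.le_total b a with h' | h'
      · rw [Nat.min_eq_left h'] at h ⊢; simp [h]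
      · rw [Nat.min_eq_right h'] at h ⊢; simp [h]
    · simp [h]

lemma pv_foldl_min_le (S : List Nat) (b : Nat) :
    S.foldl min b ≤ b ∧ ∀ x ∈ S, S.foldl min b ≤ x := by
  induction S generalizing b with
  | nil => simp
  | cons a rest ih =>
    obtain ⟨h1, h2⟩ := ih (min b a)
    refine ⟨le_trans h1 (Nat.min_le_left _ _), ?_⟩
    intro x hx
    rcases List.mem_cons.mp hx with rfl | hx
    · exact le_trans h1 (Nat.min_le_right _ _)
    · exact h2 x hx

lemma pv_mem_pvS_iff (t : List Char) (p : Nat) : p ∈ pvS t ↔ pvG p t := by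
  constructor
  · intro h
    simp only [pvS, List.mem_flatMap, List.mem_range, List.mem_filterMap] at h
    obtain ⟨i, _, kv, hkv, hsome⟩ := h
    by_cases hp : kv.1.toList.isPrefixOf (t.drop i)
    · simp [hp] at hsome
      refine ⟨kv, hkv, hsome, ?_⟩
      exact List.infix_iff_prefix_suffix.mpr
        ⟨t.drop i, List.isPrefixOf_iff_prefix.mp hp, List.drop_suffix i t⟩
    · simp [hp] at hsome
  · rintro ⟨kv, hkv, rfl, hinf⟩
    have hne : kv.1.toList ≠ [] := by
      revert hkv; simp [pvKeywords]; rintro (h | h | h | h | h | h | h | h | h | h | h | h | h | h | h | h | h | h | h | h) <;> subst h <;> decide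
    have hisin : PySem.Chars.isIn kv.1.toList t = true := (PySem.Chars.isIn_iff_infix _ _).mpr hinf
    obtain ⟨j, hj⟩ := (PySem.Chars.exists_prefix_drop_iff_isIn _ _).mpr hisin
    have hjlt : j < t.length := by
      by_contra hge
      have : t.drop j = [] := List.drop_eq_nil_of_le (by omega)
      rw [this] at hj
      exact hne (List.prefix_nil.mp hj)
    simp only [pvS, List.mem_flatMap, List.mem_range, List.mem_filterMap]
    exact ⟨j, hjlt, kv, hkv, by simp [List.isPrefixOf_iff_prefix.mpr hj]⟩

lemma pv_mem_pvS_le (t : List Char) (p : Nat) (h : p ∈ pvS t) : p ≤ 4 := by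
  obtain ⟨kv, hkv, rfl, -⟩ := (pv_mem_pvS_iff t p).mp h
  revert hkv; simp [pvKeywords]
  rintro (h | h | h | h | h | h | h | h | h | h | h | h | h | h | h | h | h | h | h | h) <;> subst h <;> decide

lemma pv_best_of (t : List Char) (p : Nat) (hp : pvG p t)
    (hlt : ∀ q < p, ¬ pvG q t) : (pvS t).foldl min 5 = p := by
  have hmemS : p ∈ pvS t := (pv_mem_pvS_iff t p).mpr hp
  have hp4 : p ≤ 4 := pv_mem_pvS_le t p hmemS
  obtain ⟨hle5, hleS⟩ := pv_foldl_min_le (pvS t) 5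
  have hbp : (pvS t).foldl min 5 ≤ p := hleS p hmemS
  rcases List.mem_cons.mp (pv_foldl_min_mem (pvS t) 5) with h | h
  · omega
  · have hGb := (pv_mem_pvS_iff t _).mp h
    by_contra hne
    exact hlt _ (by omega) hGb

lemma pv_best_none (t : List Char) (h : ∀ q, ¬ pvG q t) : (pvS t).foldl min 5 = 5 := by
  rcases List.mem_cons.mp (pv_foldl_min_mem (pvS t) 5) with hm | hm
  · exact hm
  · exact absurd ((pv_mem_pvS_iff t _).mp hm) (h _)

-- ===== VERDICT (by name: the statement is the Claim_ definition above) =====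
theorem determine_design_focus_spec : Claim_equal_determine_design_focus := by
  intro task _
  show determine_design_focus task = determine_design_focus_alt task
  simp only [determine_design_focus, determine_design_focus_alt]
  generalize PySem.Str.lower task = s
  rw [pv_outer_eq (List.range s.toList.length) s.toList 5]
  have hS : (List.range s.toList.length).flatMap (fun i =>
      pvKeywords.filterMap (fun kv =>
        if kv.1.toList.isPrefixOf (s.toList.drop i) then some kv.2 else none)) = pvS s.toList := rfl
  rw [hS]
  have e0 : (["architecture", "system design", "microservice"].any (fun w => PySem.Str.isIn w s) = true) ↔ pvG 0 s.toList := by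
    simp [pvG, pvKeywords, PySem.Chars.isIn_iff_infix]
  have e1 : (["database", "schema", "model", "entity"].any (fun w => PySem.Str.isIn w s) = true) ↔ pvG 1 s.toList := by
    simp [pvG, pvKeywords, PySem.Chars.isIn_iff_infix]
  have e2 : (["api", "endpoint", "rest", "graphql"].any (fun w => PySem.Str.isIn w s) = true) ↔ pvG 2 s.toList := by
    simp [pvG, pvKeywords, PySem.Chars.isIn_iff_infix]
  have e3 : (["ui", "ux", "interface", "component", "screen"].any (fun w => PySem.Str.isIn w s) = true) ↔ pvG 3 s.toList := by
    simp [pvG, pvKeywords, PySem.Chars.isIn_iff_infix]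
  have e4 : (["flow", "process", "workflow", "sequence"].any (fun w => PySem.Str.isIn w s) = true) ↔ pvG 4 s.toList := by
    simp [pvG, pvKeywords, PySem.Chars.isIn_iff_infix]
  have h45 : ∀ q, 4 < q → ¬ pvG q s.toList := by
    intro q hq hGq
    have := pv_mem_pvS_le s.toList q ((pv_mem_pvS_iff s.toList q).mpr hGq)
    omega
  by_cases h0 : pvG 0 s.toList
  · rw [if_pos (e0.mpr h0), pv_best_of s.toList 0 h0 (by omega)]
    rfl
  · rw [if_neg (fun hc => h0 (e0.mp hc))]
    by_cases h1 : pvG 1 s.toList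
    · rw [if_pos (e1.mpr h1), pv_best_of s.toList 1 h1 (by intro q hq; interval_cases q; exact h0)]
      rfl
    · rw [if_neg (fun hc => h1 (e1.mp hc))]
      by_cases h2 : pvG 2 s.toList
      · rw [if_pos (e2.mpr h2), pv_best_of s.toList 2 h2
          (by intro q hq; interval_cases q; exacts [h0, h1])]
        rfl
      · rw [if_neg (fun hc => h2 (e2.mp hc))]
        by_cases h3 : pvG 3 s.toList
        · rw [if_pos (e3.mpr h3), pv_best_of s.toList 3 h3
            (by intro q hq; interval_cases q; exacts [h0, h1, h2])]
          rfl
        · rw [if_neg (fun hc => h3 (e3.mp hc))]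
          by_cases h4 : pvG 4 s.toList
          · rw [if_pos (e4.mpr h4), pv_best_of s.toList 4 h4
              (by intro q hq; interval_cases q; exacts [h0, h1, h2, h3])]
            rfl
          · rw [if_neg (fun hc => h4 (e4.mp hc)), pv_best_none s.toList
              (by intro q hGq
                  have hle := pv_mem_pvS_le s.toList q ((pv_mem_pvS_iff s.toList q).mpr hGq)
                  interval_cases q
                  exacts [h0 hGq, h1 hGq, h2 hGq, h3 hGq, h4 hGq])]
            rfl
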